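-- pv_equiv track=rewrite | github.com/BudarinPavel/algorithms | yan_algorithm_training_1/l3.py | words_in_dict
-- ===== SOURCE A (Python) =====
-- def words_in_dict(dictionary, text):
--     all_words = set(dictionary)
--     for word in dictionary:
--         for mis_pos in range(len(word)):
--             all_words.add(word[:mis_pos] + word[mis_pos + 1:])
--     ans = []
--     for word in text:
--         ans.append(word in all_words)
--     return ans
-- ===== SOURCE B (Python) =====
-- def words_in_dict(dictionary, text):
--     words = set(dictionary)
--
--     def one_deletion(w, d):
--         # True iff w is d with exactly one character removed.
--         if len(d) != len(w) + 1:
--             return False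
--         while w and w[0] == d[0]:
--             w, d = w[1:], d[1:]
--         return w == d[1:]
--
--     return [w in words or any(one_deletion(w, d) for d in dictionary)
--             for w in text]
-- ===== Notes on version B (the rewrite author's own statement) =====
-- stated objective: alternative
-- what changed: Instead of precomputing a set of all one-deletion variants of every dictionary word, B keeps only the raw word set and answers each query word w by a two-pointer one-deletion test (shave common prefix, compare tails) against each dictionary word.
import Mathlib
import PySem

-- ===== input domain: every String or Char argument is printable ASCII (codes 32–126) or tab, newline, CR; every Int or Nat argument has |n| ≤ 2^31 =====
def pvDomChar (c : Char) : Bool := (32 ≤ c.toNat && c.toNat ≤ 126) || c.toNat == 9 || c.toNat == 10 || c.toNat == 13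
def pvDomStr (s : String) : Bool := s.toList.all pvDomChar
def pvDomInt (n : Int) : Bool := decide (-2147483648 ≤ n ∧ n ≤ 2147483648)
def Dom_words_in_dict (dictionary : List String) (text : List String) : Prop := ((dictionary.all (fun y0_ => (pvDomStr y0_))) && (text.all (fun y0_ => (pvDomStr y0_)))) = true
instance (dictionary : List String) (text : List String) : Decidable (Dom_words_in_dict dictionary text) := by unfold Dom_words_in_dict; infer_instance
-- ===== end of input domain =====

-- B replaces A's precomputed set of one-deletion variants by a query-side two-pointer
-- one-deletion test against the raw dictionary (alternative decomposition, not faster).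
-- Strings are handled on the List Char side (PySem.Chars), as PYSEM.md prescribes.

-- ===== PORT A =====
def words_in_dict (dictionary : List String) (text : List String) : List Bool :=
  let all_words : PySem.Set (List Char) := PySem.Set.ofList (dictionary.map String.toList)
  let all_words :=
    dictionary.foldl (fun s word =>
      (PySem.List.pyRange 0 (word.toList.length : Int) 1).foldl (fun s mis_pos =>
        PySem.Set.add s
          (PySem.Chars.slice word.toList none (some mis_pos) ++
           PySem.Chars.slice word.toList (some (mis_pos + 1)) none)) s) all_words
  text.foldl (fun ans word => ans ++ [PySem.Set.contains all_words word.toList]) []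

-- ===== PORT B =====
-- the 'while w and w[0] == d[0]: w, d = w[1:], d[1:]' loop; the (_ :: _, []) case is
-- unreachable under the length guard in oneDel and only makes the match total
def oneDelLoop : List Char → List Char → Bool
  | [], d => d.drop 1 == []
  | _ :: _, [] => false
  | a :: w', b :: d' => if a == b then oneDelLoop w' d' else a :: w' == d'

def oneDel (w d : List Char) : Bool :=
  if d.length = w.length + 1 then oneDelLoop w d else false

def words_in_dict_alt (dictionary : List String) (text : List String) : List Bool :=
  let words : PySem.Set (List Char) := PySem.Set.ofList (dictionary.map String.toList)
  text.map (fun w =>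
    PySem.Set.contains words w.toList || dictionary.any (fun d => oneDel w.toList d.toList))

-- ===== PRECONDITION & SPEC =====
def Spec_words_in_dict (dictionary : List String) (text : List String) (out : List Bool) : Prop := out = words_in_dict_alt dictionary text
instance (dictionary : List String) (text : List String) (out : List Bool) : Decidable (Spec_words_in_dict dictionary text out) := by unfold Spec_words_in_dict; infer_instance

-- ===== CLAIM (what is proved, stated in full; the proofs are below) =====
def Claim_equal_words_in_dict : Prop := ∀ (dictionary : List String) (text : List String), Dom_words_in_dict dictionary text → Spec_words_in_dict dictionary text (words_in_dict dictionary text)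

-- ===== LEMMAS AND PROOFS =====

-- membership in a fold that Set.adds (g x) for each x of l
lemma mem_foldl_add {β : Type} (g : β → List Char) (l : List β) (s : PySem.Set (List Char))
    (y : List Char) :
    y ∈ l.foldl (fun s x => PySem.Set.add s (g x)) s ↔ y ∈ s ∨ ∃ x ∈ l, g x = y := by
  induction l generalizing s with
  | nil => simp
  | cons b l ih =>
      simp [List.foldl_cons, ih, PySem.Set.mem_add]
      tauto

-- membership in A's double fold over the dictionary and the deletion positions
lemma mem_outer (dictionary : List String) (s : PySem.Set (List Char)) (y : List Char) :
    y ∈ dictionary.foldl (fun s word =>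
        (PySem.List.pyRange 0 (word.toList.length : Int) 1).foldl (fun s mis_pos =>
          PySem.Set.add s
            (PySem.Chars.slice word.toList none (some mis_pos) ++
             PySem.Chars.slice word.toList (some (mis_pos + 1)) none)) s) s
      ↔ y ∈ s ∨ ∃ d ∈ dictionary, ∃ p ∈ PySem.List.pyRange 0 (d.toList.length : Int) 1,
          PySem.Chars.slice d.toList none (some p) ++
          PySem.Chars.slice d.toList (some (p + 1)) none = y := by
  induction dictionary generalizing s with
  | nil => simp
  | cons w l ih =>
      simp only [List.foldl_cons, ih, mem_foldl_add, List.mem_cons]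
      constructor
      · rintro (⟨h | ⟨p, hp, he⟩⟩ | ⟨d, hd, hx⟩)
        · exact Or.inl h
        · exact Or.inr ⟨w, Or.inl rfl, p, hp, he⟩
        · exact Or.inr ⟨d, Or.inr hd, hx⟩
      · rintro (h | ⟨d, hd | hd, hx⟩)
        · exact Or.inl (Or.inl h)
        · exact Or.inl (Or.inr (hd ▸ hx))
        · exact Or.inr ⟨d, hd, hx⟩

-- correctness of the two-pointer loop under the length guard
lemma oneDelLoop_iff (w d : List Char) (h : d.length = w.length + 1) :
    oneDelLoop w d = true ↔ ∃ k < d.length, d.eraseIdx k = w := by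
  induction w generalizing d with
  | nil =>
      match d, h with
      | [b], _ =>
          simp [oneDelLoop]
  | cons a w' ih =>
      match d, h with
      | b :: d', h =>
          have hlen : d'.length = w'.length + 1 := by simpa using h
          by_cases hab : a = b
          · subst hab
            simp only [oneDelLoop, beq_self_eq_true, if_true, ih d' hlen]
            constructor
            · rintro ⟨k, hk, he⟩
              exact ⟨k + 1, by simpa using Nat.succ_lt_succ hk, by simp [List.eraseIdx, he]⟩
            · rintro ⟨k, hk, he⟩
              match k, he with
              | 0, he =>
                  refine ⟨0, by omega, ?_⟩
                  simp only [List.eraseIdx] at he ⊢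
                  cases he
                  rfl
              | k + 1, he =>
                  simp only [List.eraseIdx_cons_succ, List.cons.injEq] at he
                  exact ⟨k, by simp at hk; omega, he.2⟩
          · simp only [oneDelLoop, beq_iff_eq, hab, if_false, beq_iff_eq]
            constructor
            · intro he
              exact ⟨0, by simp, by simpa using he.symm⟩
            · rintro ⟨k, hk, he⟩
              match k, he with
              | 0, he => simpa using he.symm
              | k + 1, he =>
                  simp only [List.eraseIdx_cons_succ, List.cons.injEq] at he
                  exact absurd he.1.symm hab

-- A's slice-built deletion variants are exactly the eraseIdx's
lemma exists_slice_iff_eraseIdx (d w : List Char) :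
    (∃ p ∈ PySem.List.pyRange 0 (d.length : Int) 1,
        PySem.Chars.slice d none (some p) ++ PySem.Chars.slice d (some (p + 1)) none = w)
      ↔ ∃ k < d.length, d.eraseIdx k = w := by
  constructor
  · rintro ⟨p, hp, he⟩
    rw [PySem.List.mem_pyRange_one] at hp
    obtain ⟨k, rfl⟩ : ∃ k : Nat, p = (k : Int) := ⟨p.toNat, by omega⟩
    refine ⟨k, by exact_mod_cast hp.2, ?_⟩
    simp only [PySem.Chars.slice_eq_listSlice] at he
    rw [PySem.List.slice_to_natCast,
      show ((k : Int) + 1) = ((k + 1 : Nat) : Int) from by push_cast; ring,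
      PySem.List.slice_from_natCast] at he
    rw [List.eraseIdx_eq_take_drop_succ]
    exact he
  · rintro ⟨k, hk, he⟩
    refine ⟨(k : Int), by rw [PySem.List.mem_pyRange_one]; omega, ?_⟩
    rw [List.eraseIdx_eq_take_drop_succ] at he
    simp only [PySem.Chars.slice_eq_listSlice]
    rw [PySem.List.slice_to_natCast,
      show ((k : Int) + 1) = ((k + 1 : Nat) : Int) from by push_cast; ring,
      PySem.List.slice_from_natCast]
    exact he

lemma oneDel_iff (w d : List Char) :
    oneDel w d = true ↔ ∃ k < d.length, d.eraseIdx k = w := by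
  unfold oneDel
  split_ifs with h
  · exact oneDelLoop_iff w d h
  · simp only [false_iff]
    rintro ⟨k, hk, rfl⟩
    exact h (by rw [List.length_eraseIdx_of_lt hk]; omega)

-- ===== VERDICT (by name: the statement is the Claim_ definition above) =====
theorem words_in_dict_spec : Claim_equal_words_in_dict := by
  intro dictionary text _
  unfold Spec_words_in_dict words_in_dict words_in_dict_alt
  rw [PySem.List.foldl_append_singleton_eq_map]
  apply List.map_congr_left
  intro w hw
  rw [Bool.eq_iff_iff]
  simp only [PySem.Set.contains_iff, Bool.or_eq_true, List.any_eq_true, mem_outer,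
    PySem.Set.mem_ofList, List.mem_map]
  constructor
  · rintro (h | ⟨d, hd, hx⟩)
    · exact Or.inl h
    · exact Or.inr ⟨d, hd, (oneDel_iff _ _).2 ((exists_slice_iff_eraseIdx d.toList w.toList).1 hx)⟩
  · rintro (h | ⟨d, hd, hx⟩)
    · exact Or.inl h
    · exact Or.inr ⟨d, hd, (exists_slice_iff_eraseIdx d.toList w.toList).2 ((oneDel_iff _ _).1 hx)⟩
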